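-- pv_equiv track=rewrite | github.com/MostafaiQ/japan225-bot | storage/scan_analyzer.py | _build_regime_summary
-- ===== SOURCE A (Python) =====
-- def _build_regime_summary(missed_data: list[dict]) -> dict[str, dict]:
--     """Conditional probability: given regime, what is the miss rate?
--     This is the core quant insight — base rates are noisy, conditional rates are signal.
--     """
--     regimes = ["BULL", "BEAR", "NEUTRAL", "UNKNOWN"]
--     summary = {r: {"count": 0, "true_missed": 0, "thank_god": 0} for r in regimes}
--     for item in missed_data:
--         r = item.get("regime", "UNKNOWN")
--         if r not in summary:
--             summary[r] = {"count": 0, "true_missed": 0, "thank_god": 0}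
--         summary[r]["count"] += 1
--         summary[r][item.get("outcome", "small_move")] = summary[r].get(item.get("outcome", "small_move"), 0) + 1
--     return summary
-- ===== SOURCE B (Python) =====
-- from collections import Counter
--
--
-- def _build_regime_summary(missed_data: list[dict]) -> dict[str, dict]:
--     regs = [item.get("regime", "UNKNOWN") for item in missed_data]
--     outs = [item.get("outcome", "small_move") for item in missed_data]
--     pairs = list(zip(regs, outs))
--     reg_counts = Counter(regs)
--     pair_counts = Counter(pairs)
--     summary = {}
--     for r in ["BULL", "BEAR", "NEUTRAL", "UNKNOWN"] + regs:
--         if r in summary: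
--             continue
--         d = {"count": reg_counts.get(r, 0), "true_missed": 0, "thank_god": 0}
--         for (rr, o), c in pair_counts.items():
--             if rr == r:
--                 d[o] = d.get(o, 0) + c
--         summary[r] = d
--     return summary
-- ===== Notes on version B (the rewrite author's own statement) =====
-- stated objective: alternative
-- what changed: A updates one nested dict incrementally per item; B first builds two Counters (regime totals and (regime,outcome) pair totals) plus the key order, then assembles each regime's row in one table-build pass from the counters.
import Mathlib
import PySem

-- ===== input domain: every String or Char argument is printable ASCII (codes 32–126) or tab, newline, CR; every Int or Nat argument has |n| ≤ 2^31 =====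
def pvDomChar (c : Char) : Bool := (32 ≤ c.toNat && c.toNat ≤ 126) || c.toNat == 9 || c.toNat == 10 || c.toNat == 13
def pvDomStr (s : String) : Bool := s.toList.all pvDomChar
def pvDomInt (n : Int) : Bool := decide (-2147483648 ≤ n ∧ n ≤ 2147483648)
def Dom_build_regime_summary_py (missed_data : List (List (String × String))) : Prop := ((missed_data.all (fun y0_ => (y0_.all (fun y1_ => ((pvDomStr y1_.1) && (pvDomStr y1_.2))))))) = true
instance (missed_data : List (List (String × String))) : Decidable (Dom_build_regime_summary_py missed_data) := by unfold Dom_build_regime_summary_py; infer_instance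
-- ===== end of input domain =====

-- B replaces A's per-item nested-dict updates by a two-pass shape: build a regime Counter and a
-- (regime, outcome) pair Counter first, then assemble each regime's row from the counters (objective: alternative).

-- ===== PORT A =====
def build_regime_summary_py (missed_data : List (List (String × String))) : List (String × List (String × Int)) :=
  let regimes : List String := ["BULL", "BEAR", "NEUTRAL", "UNKNOWN"]
  let summary0 : PySem.Dict String (PySem.Dict String Int) :=
    regimes.foldl (fun s r =>
      s.insert r (PySem.Dict.mk [("count", 0), ("true_missed", 0), ("thank_god", 0)])) PySem.Dict.empty
  let summary := missed_data.foldl (fun summary item =>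
    let r := (PySem.Dict.ofList item).getD "regime" "UNKNOWN"
    let summary :=
      if summary.contains r then summary
      else summary.insert r (PySem.Dict.mk [("count", 0), ("true_missed", 0), ("thank_god", 0)])
    let summary := summary.modify r PySem.Dict.empty (fun d => d.modify "count" 0 (· + 1))
    let o := (PySem.Dict.ofList item).getD "outcome" "small_move"
    summary.modify r PySem.Dict.empty (fun d => d.insert o (d.getD o 0 + 1))) summary0
  summary.items.map (fun p => (p.1, p.2.items))

-- ===== PORT B =====
def build_regime_summary_py_alt (missed_data : List (List (String × String))) : List (String × List (String × Int)) :=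
  let regs := missed_data.map (fun item => (PySem.Dict.ofList item).getD "regime" "UNKNOWN")
  let outs := missed_data.map (fun item => (PySem.Dict.ofList item).getD "outcome" "small_move")
  let pairs := regs.zip outs
  let reg_counts := PySem.Dict.counter regs
  let pair_counts := PySem.Dict.counter pairs
  let summary := (["BULL", "BEAR", "NEUTRAL", "UNKNOWN"] ++ regs).foldl (fun summary r =>
    if summary.contains r then summary
    else
      let d : PySem.Dict String Int :=
        PySem.Dict.mk [("count", reg_counts.getD r 0), ("true_missed", 0), ("thank_god", 0)]
      let d := pair_counts.items.foldl (fun d p =>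
        if p.1.1 == r then d.insert p.1.2 (d.getD p.1.2 0 + p.2) else d) d
      summary.insert r d) PySem.Dict.empty
  summary.items.map (fun p => (p.1, p.2.items))

-- ===== PRECONDITION & SPEC =====
def Spec_build_regime_summary_py (missed_data : List (List (String × String))) (out : List (String × List (String × Int))) : Prop := out = build_regime_summary_py_alt missed_data
instance (missed_data : List (List (String × String))) (out : List (String × List (String × Int))) : Decidable (Spec_build_regime_summary_py missed_data out) := by unfold Spec_build_regime_summary_py; infer_instance

-- ===== CLAIM (what is proved, stated in full; the proofs are below) =====
def Claim_equal_build_regime_summary_py : Prop := ∀ (missed_data : List (List (String × String))), Dom_build_regime_summary_py missed_data → Spec_build_regime_summary_py missed_data (build_regime_summary_py missed_data)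

-- ===== LEMMAS AND PROOFS =====
def pvBase3 : PySem.Dict String Int := PySem.Dict.mk [("count", 0), ("true_missed", 0), ("thank_god", 0)]
def pvStepInner (d : PySem.Dict String Int) (o : String) : PySem.Dict String Int :=
  let d' := d.modify "count" 0 (· + 1)
  d'.insert o (d'.getD o 0 + 1)
def pvStepA (s : PySem.Dict String (PySem.Dict String Int)) (p : String × String) :
    PySem.Dict String (PySem.Dict String Int) :=
  let s' := if s.contains p.1 then s else s.insert p.1 pvBase3
  (s'.modify p.1 PySem.Dict.empty (fun d => d.modify "count" 0 (· + 1))).modify p.1 PySem.Dict.empty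
    (fun d => d.insert p.2 (d.getD p.2 0 + 1))

lemma pvStepA_contains (s : PySem.Dict String (PySem.Dict String Int)) (p : String × String)
    (r : String) : (pvStepA s p).contains r = (r == p.1 || s.contains r) := by
  unfold pvStepA
  by_cases h : s.contains p.1
  · simp [h, PySem.Dict.contains_modify]
  · simp only [Bool.not_eq_true] at h
    simp [h, PySem.Dict.contains_modify, PySem.Dict.contains_insert]

lemma pvSetContainsKeys {ν : Type} (d : PySem.Dict String ν) (x : String) :
    PySem.Set.contains d.keys x = d.contains x := by
  rw [PySem.Dict.contains_eq_decide_mem_keys]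
  simp [PySem.Set.contains]

lemma pvStepA_keys (s : PySem.Dict String (PySem.Dict String Int)) (p : String × String) :
    (pvStepA s p).keys = PySem.Set.add s.keys p.1 := by
  unfold pvStepA
  by_cases h : s.contains p.1
  · simp [h, PySem.Dict.keys_modify, PySem.Dict.keys_insert_of_contains, PySem.Set.add,
      PySem.Dict.contains_modify]
    exact (PySem.Dict.contains_iff_mem_keys s p.1).1 h
  · simp only [Bool.not_eq_true] at h
    simp [h, PySem.Dict.keys_modify, PySem.Dict.keys_insert_of_contains,
      PySem.Dict.keys_insert_of_not_contains s pvBase3 h, PySem.Set.add,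
      PySem.Dict.contains_modify]
    intro hm
    exact absurd ((PySem.Dict.contains_iff_mem_keys s p.1).2 hm) (by simp [h])

lemma pvStepA_getD_ne (s : PySem.Dict String (PySem.Dict String Int)) (p : String × String)
    {r : String} (h : r ≠ p.1) :
    (pvStepA s p).getD r PySem.Dict.empty = s.getD r PySem.Dict.empty := by
  unfold pvStepA
  rw [PySem.Dict.getD_modify, if_neg h, PySem.Dict.getD_modify, if_neg h]
  by_cases hc : s.contains p.1
  · simp [hc]
  · simp only [Bool.not_eq_true] at hc
    simp [hc, PySem.Dict.getD_insert, if_neg h]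

lemma pvStepA_getD_self (s : PySem.Dict String (PySem.Dict String Int)) (p : String × String) :
    (pvStepA s p).getD p.1 PySem.Dict.empty =
      pvStepInner (if s.contains p.1 then s.getD p.1 PySem.Dict.empty else pvBase3) p.2 := by
  unfold pvStepA pvStepInner
  rw [PySem.Dict.getD_modify, if_pos rfl, PySem.Dict.getD_modify, if_pos rfl]
  by_cases hc : s.contains p.1
  · simp [hc]
  · simp only [Bool.not_eq_true] at hc
    simp [hc, PySem.Dict.getD_insert_self]

def pvOs (ps : List (String × String)) (r : String) : List String :=
  (ps.filter (fun p => p.1 == r)).map (·.2)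

lemma pvKeysA : ∀ (ps : List (String × String)) (s : PySem.Dict String (PySem.Dict String Int)),
    (ps.foldl pvStepA s).keys = PySem.Set.update s.keys (ps.map Prod.fst) := by
  intro ps
  induction ps with
  | nil => intro s; rfl
  | cons p ps ih =>
    intro s
    simp only [List.foldl_cons, List.map_cons]
    rw [ih]
    rw [pvStepA_keys]
    rfl

lemma pvGetA (r : String) : ∀ (ps : List (String × String))
    (s : PySem.Dict String (PySem.Dict String Int)),
    (ps.foldl pvStepA s).getD r PySem.Dict.empty =
      if r ∈ ps.map Prod.fst then
        (pvOs ps r).foldl pvStepInner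
          (if s.contains r then s.getD r PySem.Dict.empty else pvBase3)
      else s.getD r PySem.Dict.empty := by
  intro ps
  induction ps with
  | nil => intro s; simp
  | cons p ps ih =>
    obtain ⟨a, b⟩ := p
    intro s
    simp only [List.foldl_cons, List.map_cons]
    rw [ih]
    by_cases hr : r = a
    · subst hr
      have hcont : (pvStepA s (r, b)).contains r = true := by simp [pvStepA_contains]
      have hself := pvStepA_getD_self s (r, b)
      simp only at hself
      have hos : pvOs ((r, b) :: ps) r = b :: pvOs ps r := by
        simp [pvOs]
      rw [hos]
      by_cases hm : r ∈ ps.map Prod.fst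
      · simp only [hm, if_true, hcont, List.mem_cons, true_or, List.foldl_cons]
        rw [hself]
      · have hos2 : pvOs ps r = [] := by
          simp only [pvOs, List.map_eq_nil_iff, List.filter_eq_nil_iff]
          intro q hq
          simp only [beq_iff_eq]
          intro hq1
          exact hm (List.mem_map.2 ⟨q, hq, hq1⟩)
        simp only [hm, if_false, List.mem_cons, true_or, if_true, hos2, List.foldl_cons,
          List.foldl_nil, hcont]
        rw [hself]
    · have hcont : (pvStepA s (a, b)).contains r = s.contains r := by
        simp [pvStepA_contains, hr]
      have hgd := pvStepA_getD_ne s (a, b) (by simpa using hr)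
      have hos : pvOs ((a, b) :: ps) r = pvOs ps r := by
        simp only [pvOs, List.filter_cons]
        have : ((a, b).1 == r) = false := by simp only [beq_eq_false_iff_ne]; exact fun h => hr h.symm
        simp [this]
      have hmem : (r ∈ a :: ps.map Prod.fst) ↔ r ∈ ps.map Prod.fst := by
        simp [hr]
      rw [hcont, hgd, hos]
      by_cases hm : r ∈ ps.map Prod.fst
      · simp [hm, hmem]
      · simp [hm, hmem]

def pvStepB (f : String → PySem.Dict String Int)
    (s : PySem.Dict String (PySem.Dict String Int)) (r : String) :
    PySem.Dict String (PySem.Dict String Int) :=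
  if s.contains r then s else s.insert r (f r)

lemma pvKeysB (f : String → PySem.Dict String Int) :
    ∀ (rs : List String) (s : PySem.Dict String (PySem.Dict String Int)),
    (rs.foldl (pvStepB f) s).keys = PySem.Set.update s.keys rs := by
  intro rs
  induction rs with
  | nil => intro s; rfl
  | cons x rs ih =>
    intro s
    simp only [List.foldl_cons]
    rw [ih]
    have hstep : (pvStepB f s x).keys = PySem.Set.add s.keys x := by
      unfold pvStepB
      by_cases h : s.contains x
      · simp only [if_true, PySem.Set.add, pvSetContainsKeys, h]
      · simp only [Bool.not_eq_true] at h
        simp only [h, if_false, PySem.Dict.keys_insert_of_not_contains s (f x) h,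
          PySem.Set.add, pvSetContainsKeys, Bool.false_eq_true]
    rw [hstep]
    rfl

lemma pvGetB (f : String → PySem.Dict String Int) (r : String) :
    ∀ (rs : List String) (s : PySem.Dict String (PySem.Dict String Int)),
    (rs.foldl (pvStepB f) s).getD r PySem.Dict.empty =
      if s.contains r then s.getD r PySem.Dict.empty
      else if r ∈ rs then f r else PySem.Dict.empty := by
  intro rs
  induction rs with
  | nil =>
    intro s
    by_cases h : s.contains r
    · simp [h]
    · simp only [Bool.not_eq_true] at h
      simp [h, PySem.Dict.getD_of_not_contains s PySem.Dict.empty h]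
  | cons x rs ih =>
    intro s
    simp only [List.foldl_cons]
    rw [ih]
    unfold pvStepB
    by_cases h : s.contains x
    · simp only [h, if_true]
      by_cases hr : s.contains r
      · simp [hr]
      · simp only [Bool.not_eq_true] at hr
        have hrx : ¬ r = x := fun he => by rw [he] at hr; rw [hr] at h; exact Bool.noConfusion h
        simp [hr, hrx]
    · simp only [Bool.not_eq_true] at h
      simp only [h, if_false, Bool.false_eq_true, PySem.Dict.contains_insert]
      by_cases hrx : r = x
      · subst hrx
        simp [h, PySem.Dict.getD_insert_self]
      · have : (r == x) = false := by simp [beq_eq_false_iff_ne, hrx]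
        simp only [this, Bool.false_or]
        by_cases hr : s.contains r
        · simp [hr, PySem.Dict.getD_insert, hrx]
        · simp only [Bool.not_eq_true] at hr
          simp [hr, hrx]

lemma pvGetDInner (k : String) : ∀ (os : List String) (d : PySem.Dict String Int),
    (os.foldl pvStepInner d).getD k 0 =
      d.getD k 0 + (if k = "count" then (os.length : Int) else 0) + (os.count k : Int) := by
  intro os
  induction os with
  | nil => intro d; simp
  | cons o os ih =>
    intro d
    simp only [List.foldl_cons]
    rw [ih]
    have hstep : (pvStepInner d o).getD k 0 =
        d.getD k 0 + (if k = "count" then 1 else 0) + (if o = k then 1 else 0) := by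
      unfold pvStepInner
      simp only [PySem.Dict.getD_insert, PySem.Dict.getD_modify]
      by_cases hk : k = o
      · subst hk
        by_cases hc : k = "count" <;> simp [hc]
      · have : ¬ o = k := fun h => hk h.symm
        simp only [hk, if_false, this, add_zero]
        split_ifs with hcnt
        · rw [hcnt]
        · ring
    rw [hstep, List.count_cons, List.length_cons]
    by_cases hc : k = "count" <;> by_cases ho : o = k <;>
      simp [hc, ho] <;> ring

lemma pvKeysInner : ∀ (os : List String) (d : PySem.Dict String Int), "count" ∈ d.keys →
    (os.foldl pvStepInner d).keys = PySem.Set.update d.keys os := by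
  intro os
  induction os with
  | nil => intro d _; rfl
  | cons o os ih =>
    intro d hd
    simp only [List.foldl_cons]
    have hcc : d.contains "count" = true := (PySem.Dict.contains_iff_mem_keys d "count").2 hd
    have hkeys : (pvStepInner d o).keys = PySem.Set.add d.keys o := by
      unfold pvStepInner
      simp only []
      have hmc : (d.modify "count" 0 (· + 1)).contains o = d.contains o := by
        by_cases ho : o = "count"
        · subst ho; simp [PySem.Dict.contains_modify, hcc]
        · simp [PySem.Dict.contains_modify, ho]
      have hmk : (d.modify "count" 0 (· + 1)).keys = d.keys := by
        rw [PySem.Dict.keys_modify, PySem.Dict.keys_insert_of_contains d _ hcc]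
      by_cases h : d.contains o
      · rw [PySem.Dict.keys_insert_of_contains _ _ (by rw [hmc]; exact h), hmk]
        have hmem : o ∈ d.keys := (PySem.Dict.contains_iff_mem_keys d o).1 h
        simp [PySem.Set.add, hmem]
      · simp only [Bool.not_eq_true] at h
        rw [PySem.Dict.keys_insert_of_not_contains _ _ (by rw [hmc]; exact h), hmk]
        have hmem : o ∉ d.keys := fun hm => by
          rw [(PySem.Dict.contains_iff_mem_keys d o).2 hm] at h; exact Bool.noConfusion h
        simp [PySem.Set.add, hmem]
    rw [ih _ (by rw [hkeys]; exact (PySem.Set.mem_add d.keys o "count").2 (Or.inl hd)), hkeys]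
    rfl

lemma pvGetDFoldB (r k : String) : ∀ (qs : List ((String × String) × Int))
    (d : PySem.Dict String Int),
    (qs.foldl (fun d p => if p.1.1 == r then d.insert p.1.2 (d.getD p.1.2 0 + p.2) else d) d).getD k 0
      = d.getD k 0 + ((qs.filter (fun p => p.1 == (r, k))).map (·.2)).sum := by
  intro qs
  induction qs with
  | nil => intro d; simp
  | cons q qs ih =>
    intro d
    simp only [List.foldl_cons, List.filter_cons]
    rw [ih]
    by_cases h1 : q.1.1 = r
    · simp only [h1, beq_self_eq_true, if_true]
      by_cases h2 : q.1.2 = k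
      · have : (q.1 == (r, k)) = true := by
          rw [beq_iff_eq]; exact Prod.ext h1 h2
        simp only [this, if_true, List.map_cons, List.sum_cons]
        rw [PySem.Dict.getD_insert]
        simp only [h2, if_true]
        ring
      · have : (q.1 == (r, k)) = false := by
          simp only [beq_eq_false_iff_ne]; exact fun he => h2 (by rw [he])
        simp only [this, if_false, Bool.false_eq_true]
        rw [PySem.Dict.getD_insert, if_neg (fun he => h2 (by rw [he]))]
    · have hb : (q.1.1 == r) = false := by simp [beq_eq_false_iff_ne, h1]
      have : (q.1 == (r, k)) = false := by
        simp only [beq_eq_false_iff_ne]; exact fun he => h1 (by rw [he])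
      simp [hb, this]

lemma pvKeysFoldB (r : String) : ∀ (qs : List ((String × String) × Int))
    (d : PySem.Dict String Int),
    (qs.foldl (fun d p => if p.1.1 == r then d.insert p.1.2 (d.getD p.1.2 0 + p.2) else d) d).keys
      = PySem.Set.update d.keys ((qs.filter (fun p => p.1.1 == r)).map (fun p => p.1.2)) := by
  intro qs
  induction qs with
  | nil => intro d; rfl
  | cons q qs ih =>
    intro d
    simp only [List.foldl_cons, List.filter_cons]
    by_cases h1 : (q.1.1 == r) = true
    · simp only [h1, if_true, List.map_cons]
      rw [ih]
      have : (d.insert q.1.2 (d.getD q.1.2 0 + q.2)).keys = PySem.Set.add d.keys q.1.2 := by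
        by_cases h : d.contains q.1.2
        · rw [PySem.Dict.keys_insert_of_contains _ _ h]
          have hmem : q.1.2 ∈ d.keys := (PySem.Dict.contains_iff_mem_keys d q.1.2).1 h
          simp [PySem.Set.add, hmem]
        · simp only [Bool.not_eq_true] at h
          rw [PySem.Dict.keys_insert_of_not_contains _ _ h]
          have hmem : q.1.2 ∉ d.keys := fun hm => by
            rw [(PySem.Dict.contains_iff_mem_keys d q.1.2).2 hm] at h; exact Bool.noConfusion h
          simp [PySem.Set.add, hmem]
      rw [this]
      rfl
    · simp only [Bool.not_eq_true] at h1
      simp only [h1, if_false, Bool.false_eq_true]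
      exact ih d

lemma pvSetAddMem {α : Type} [BEq α] [LawfulBEq α] {s : PySem.Set α} {x : α} (h : x ∈ s) :
    s.add x = s := by
  simp [PySem.Set.add, PySem.Set.contains, h]

lemma pvSetAddNotMem {α : Type} [BEq α] [LawfulBEq α] {s : PySem.Set α} {x : α} (h : x ∉ s) :
    s.add x = s ++ [x] := by
  simp [PySem.Set.add, PySem.Set.contains, h]

lemma pvUpdateAppend (s : PySem.Set String) (a b : List String) :
    s.update (a ++ b) = (s.update a).update b := List.foldl_append ..

lemma pvCountPair (r k : String) (ps : List (String × String)) :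
    (pvOs ps r).count k = ps.count (r, k) := by
  induction ps with
  | nil => rfl
  | cons p ps ih =>
    simp only [pvOs, List.filter_cons] at *
    by_cases h1 : p.1 = r
    · by_cases h2 : p.2 = k
      · have hp : p = (r, k) := Prod.ext h1 h2
        simp [hp, ih]
      · have : ((p : String × String) == (r, k)) = false := by
          simp only [beq_eq_false_iff_ne]; exact fun he => h2 (by rw [he])
        simp [h1, List.count_cons, this, ih, h2]
    · have : ((p : String × String) == (r, k)) = false := by
        simp only [beq_eq_false_iff_ne]; exact fun he => h1 (by rw [he])
      have hb : (p.1 == r) = false := by simp [beq_eq_false_iff_ne, h1]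
      simp [hb, List.count_cons, this, ih]

lemma pvLenOs (r : String) (ps : List (String × String)) :
    (pvOs ps r).length = (ps.map Prod.fst).count r := by
  simp only [pvOs, List.length_map]
  rw [List.count_eq_countP, List.countP_map, List.countP_eq_length_filter]
  rfl

lemma pvOsAppend (r : String) (l : List (String × String)) (q : String × String) :
    pvOs (l ++ [q]) r = pvOs l r ++ (if q.1 == r then [q.2] else []) := by
  simp only [pvOs, List.filter_append, List.map_append]
  by_cases h : (q.1 == r) = true <;> simp [h]

lemma pvKeysSetEq (r : String) : ∀ (l : List (String × String)) (s : PySem.Set String),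
    PySem.Set.update s (((PySem.Set.ofList l).filter (fun q => q.1 == r)).map (·.2))
      = PySem.Set.update s (pvOs l r) := by
  intro l
  induction l using List.reverseRecOn with
  | nil => intro s; rfl
  | append_singleton l q ih =>
    intro s
    have hof : PySem.Set.ofList (l ++ [q]) = (PySem.Set.ofList l).add q := by
      simp [PySem.Set.ofList, List.foldl_append]
    rw [hof, pvOsAppend]
    by_cases hm : q ∈ PySem.Set.ofList l
    · rw [pvSetAddMem hm]
      by_cases hq : (q.1 == r) = true
      · have hq' : q.1 = r := by simpa [beq_iff_eq] using hq
        have hql : q ∈ l := (PySem.Set.mem_ofList l q).1 hm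
        have hos : q.2 ∈ pvOs l r := List.mem_map.2 ⟨q, List.mem_filter.2 ⟨hql, hq⟩, rfl⟩
        rw [hq]
        simp only [if_true]
        rw [pvUpdateAppend]
        have : (PySem.Set.update s (pvOs l r)).update [q.2] = (PySem.Set.update s (pvOs l r)).add q.2 := rfl
        rw [this, pvSetAddMem ((PySem.Set.mem_update _ _ _).2 (Or.inr hos))]
        exact ih s
      · simp only [Bool.not_eq_true] at hq
        simp only [hq, Bool.false_eq_true, if_false, List.append_nil]
        exact ih s
    · rw [pvSetAddNotMem hm]
      simp only [List.filter_append, List.map_append, List.filter_cons, List.filter_nil]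
      by_cases hq : (q.1 == r) = true
      · simp only [hq, if_true, List.map_cons, List.map_nil]
        rw [pvUpdateAppend, pvUpdateAppend, ih]
      · simp only [Bool.not_eq_true] at hq
        simp [hq, ih s]



def pvInnerB (ps : List (String × String)) (r : String) : PySem.Dict String Int :=
  (PySem.Dict.counter ps).items.foldl
    (fun d p => if p.1.1 == r then d.insert p.1.2 (d.getD p.1.2 0 + p.2) else d)
    (PySem.Dict.mk [("count", ((ps.map Prod.fst).count r : Int)), ("true_missed", 0), ("thank_god", 0)])

lemma pvBase3_getD (k : String) : pvBase3.getD k 0 = 0 := by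
  rw [PySem.Dict.getD_eq_get?_getD]
  simp only [pvBase3, PySem.Dict.get?_mk_cons]
  split_ifs <;> rfl

lemma pvD0_getD (ps : List (String × String)) (r k : String) :
    (PySem.Dict.mk [("count", ((ps.map Prod.fst).count r : Int)), ("true_missed", 0),
      ("thank_god", 0)]).getD k 0 = if k = "count" then ((ps.map Prod.fst).count r : Int) else 0 := by
  rw [PySem.Dict.getD_eq_get?_getD]
  simp only [PySem.Dict.get?_mk_cons, beq_iff_eq]
  by_cases h1 : k = "count"
  · simp [h1]
  · have : ¬ "count" = k := fun he => h1 he.symm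
    simp only [this, if_false, h1]
    split_ifs <;> rfl

lemma pvSumFilter (ps : List (String × String)) (r k : String) :
    ((((PySem.Set.ofList ps).map (fun q => (q, (ps.count q : Int)))).filter
        (fun p => p.1 == (r, k))).map (·.2)).sum = (ps.count (r, k) : Int) := by
  rw [List.filter_map, List.map_map]
  have hcomp : ((fun p : (String × String) × Int => p.1 == (r, k)) ∘
      (fun q : String × String => (q, (ps.count q : Int)))) = fun q => q == (r, k) := rfl
  rw [hcomp]
  rw [List.filter_beq]
  by_cases hm : (r, k) ∈ PySem.Set.ofList ps
  · have h1 : List.count (r, k) (PySem.Set.ofList ps) = 1 :=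
      List.count_eq_one_of_mem (PySem.Set.nodup_ofList ps) hm
    simp [h1]
  · have h1 : List.count (r, k) (PySem.Set.ofList ps) = 0 := by
      rw [List.count_eq_zero]; exact hm
    have h2 : ps.count (r, k) = 0 := by
      rw [List.count_eq_zero]
      exact fun hc => hm ((PySem.Set.mem_ofList ps (r, k)).2 hc)
    simp [h1, h2]

lemma pvInnerEq (ps : List (String × String)) (r : String) :
    (pvOs ps r).foldl pvStepInner pvBase3 = pvInnerB ps r := by
  have hb3keys : pvBase3.keys = ["count", "true_missed", "thank_god"] := rfl
  have hd0keys : (PySem.Dict.mk [("count", ((ps.map Prod.fst).count r : Int)), ("true_missed", 0),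
      ("thank_god", 0)]).keys = ["count", "true_missed", "thank_god"] := rfl
  have hkeysL : ((pvOs ps r).foldl pvStepInner pvBase3).keys =
      PySem.Set.update ["count", "true_missed", "thank_god"] (pvOs ps r) := by
    rw [pvKeysInner _ _ (by rw [hb3keys]; simp), hb3keys]
  have hqs : (PySem.Dict.counter ps).items =
      (PySem.Set.ofList ps).map (fun q => (q, (ps.count q : Int))) :=
    PySem.Dict.items_counter ps
  have hkeysR : (pvInnerB ps r).keys =
      PySem.Set.update ["count", "true_missed", "thank_god"] (pvOs ps r) := by
    unfold pvInnerB
    rw [pvKeysFoldB, hd0keys, hqs]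
    rw [List.filter_map, List.map_map]
    have hcomp : ((fun p : (String × String) × Int => p.1.1 == r) ∘
        (fun q : String × String => (q, (ps.count q : Int)))) = fun q => q.1 == r := rfl
    have hcomp2 : ((fun p : (String × String) × Int => p.1.2) ∘
        (fun q : String × String => (q, (ps.count q : Int)))) = fun q => q.2 := rfl
    rw [hcomp, hcomp2]
    exact pvKeysSetEq r ps _
  have hgetL : ∀ k, ((pvOs ps r).foldl pvStepInner pvBase3).getD k 0 =
      (if k = "count" then ((pvOs ps r).length : Int) else 0) + ((pvOs ps r).count k : Int) := by
    intro k
    rw [pvGetDInner, pvBase3_getD]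
    ring
  have hgetR : ∀ k, (pvInnerB ps r).getD k 0 =
      (if k = "count" then ((ps.map Prod.fst).count r : Int) else 0) + (ps.count (r, k) : Int) := by
    intro k
    unfold pvInnerB
    rw [pvGetDFoldB, pvD0_getD, hqs, pvSumFilter]
  have hget : ∀ k, ((pvOs ps r).foldl pvStepInner pvBase3).getD k 0 = (pvInnerB ps r).getD k 0 := by
    intro k
    rw [hgetL, hgetR, pvLenOs, pvCountPair]
  have hnodup : (PySem.Set.update ["count", "true_missed", "thank_god"] (pvOs ps r)).Nodup :=
    PySem.Set.nodup_update _ _ (by decide)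
  apply PySem.Dict.ext
  rw [PySem.Dict.items_eq_map_keys _ (by rw [hkeysL]; exact hnodup) 0,
    PySem.Dict.items_eq_map_keys _ (by rw [hkeysR]; exact hnodup) 0, hkeysL, hkeysR]
  exact List.map_congr_left (fun k _ => by rw [hget k])

def pvInit : PySem.Dict String (PySem.Dict String Int) :=
  PySem.Dict.mk [("BULL", pvBase3), ("BEAR", pvBase3), ("NEUTRAL", pvBase3), ("UNKNOWN", pvBase3)]

lemma pvInitStart (r : String) :
    (if pvInit.contains r then pvInit.getD r PySem.Dict.empty else pvBase3) = pvBase3 := by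
  by_cases h : pvInit.contains r
  · simp only [h, if_true]
    rw [PySem.Dict.getD_eq_get?_getD]
    simp only [pvInit, PySem.Dict.get?_mk_cons]
    simp only [pvInit, PySem.Dict.contains_mk, List.any_cons, List.any_nil, Bool.or_false] at h
    split_ifs with h1 h2 h3 h4 <;> try rfl
    exfalso
    simp only [h1, h2, h3, h4, Bool.or_self, Bool.false_eq_true] at h
  · simp [h]

lemma pvInitGetD {r : String} (h : pvInit.contains r = true) :
    pvInit.getD r PySem.Dict.empty = pvBase3 := by
  have := pvInitStart r
  rwa [if_pos h] at this

lemma pvOsNil {ps : List (String × String)} {k : String} (h : k ∉ ps.map Prod.fst) :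
    pvOs ps k = [] := by
  simp only [pvOs, List.map_eq_nil_iff, List.filter_eq_nil_iff]
  intro q hq
  simp only [beq_iff_eq]
  exact fun hq1 => h (List.mem_map.2 ⟨q, hq, hq1⟩)

lemma pvDictsEq (ps : List (String × String)) :
    ps.foldl pvStepA pvInit =
      (["BULL", "BEAR", "NEUTRAL", "UNKNOWN"] ++ ps.map Prod.fst).foldl
        (pvStepB (pvInnerB ps)) PySem.Dict.empty := by
  have hkeysA : (ps.foldl pvStepA pvInit).keys =
      PySem.Set.update ["BULL", "BEAR", "NEUTRAL", "UNKNOWN"] (ps.map Prod.fst) := by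
    rw [pvKeysA]; rfl
  have hkeysB : ((["BULL", "BEAR", "NEUTRAL", "UNKNOWN"] ++ ps.map Prod.fst).foldl
      (pvStepB (pvInnerB ps)) PySem.Dict.empty).keys =
      PySem.Set.update ["BULL", "BEAR", "NEUTRAL", "UNKNOWN"] (ps.map Prod.fst) := by
    rw [pvKeysB]
    have h0 : (PySem.Dict.empty : PySem.Dict String (PySem.Dict String Int)).keys = [] := rfl
    rw [h0, pvUpdateAppend]
    rw [show PySem.Set.update ([] : List String) ["BULL", "BEAR", "NEUTRAL", "UNKNOWN"]
      = ["BULL", "BEAR", "NEUTRAL", "UNKNOWN"] from by decide]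
  have hnodup : (PySem.Set.update ["BULL", "BEAR", "NEUTRAL", "UNKNOWN"] (ps.map Prod.fst)).Nodup :=
    PySem.Set.nodup_update _ _ (by decide)
  have hget : ∀ k ∈ PySem.Set.update ["BULL", "BEAR", "NEUTRAL", "UNKNOWN"] (ps.map Prod.fst),
      (ps.foldl pvStepA pvInit).getD k PySem.Dict.empty =
      ((["BULL", "BEAR", "NEUTRAL", "UNKNOWN"] ++ ps.map Prod.fst).foldl
        (pvStepB (pvInnerB ps)) PySem.Dict.empty).getD k PySem.Dict.empty := by
    intro k hk
    have hkmem : k ∈ (["BULL", "BEAR", "NEUTRAL", "UNKNOWN"] : List String) ∨ k ∈ ps.map Prod.fst :=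
      (PySem.Set.mem_update _ _ k).1 hk
    have hB : ((["BULL", "BEAR", "NEUTRAL", "UNKNOWN"] ++ ps.map Prod.fst).foldl
        (pvStepB (pvInnerB ps)) PySem.Dict.empty).getD k PySem.Dict.empty = pvInnerB ps k := by
      rw [pvGetB]
      simp only [PySem.Dict.contains_empty, Bool.false_eq_true, if_false]
      rw [if_pos (List.mem_append.2 hkmem)]
    rw [hB, pvGetA, pvInitStart, ← pvInnerEq]
    by_cases hm : k ∈ ps.map Prod.fst
    · rw [if_pos hm]
    · rw [if_neg hm, pvOsNil hm]
      have hk4 : pvInit.contains k = true := by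
        rcases hkmem with h4 | hr
        · apply (PySem.Dict.contains_iff_mem_keys pvInit k).2
          simpa [pvInit, PySem.Dict.keys_mk] using h4
        · exact absurd hr hm
      rw [List.foldl_nil]
      exact pvInitGetD hk4
  apply PySem.Dict.ext
  rw [PySem.Dict.items_eq_map_keys _ (by rw [hkeysA]; exact hnodup) PySem.Dict.empty,
    PySem.Dict.items_eq_map_keys _ (by rw [hkeysB]; exact hnodup) PySem.Dict.empty,
    hkeysA, hkeysB]
  exact List.map_congr_left (fun k hk => by rw [hget k hk])

def pvPair (it : List (String × String)) : String × String :=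
  ((PySem.Dict.ofList it).getD "regime" "UNKNOWN", (PySem.Dict.ofList it).getD "outcome" "small_move")

lemma pvA_eq (md : List (List (String × String))) :
    build_regime_summary_py md =
      ((md.map pvPair).foldl pvStepA pvInit).items.map (fun p => (p.1, p.2.items)) := by
  simp only [build_regime_summary_py]
  rw [show ((["BULL", "BEAR", "NEUTRAL", "UNKNOWN"] : List String).foldl (fun s r =>
      s.insert r (PySem.Dict.mk [("count", 0), ("true_missed", 0), ("thank_god", 0)]))
      PySem.Dict.empty) = pvInit from by decide]
  rw [List.foldl_map]
  rfl

lemma pvB_eq (md : List (List (String × String))) :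
    build_regime_summary_py_alt md =
      ((["BULL", "BEAR", "NEUTRAL", "UNKNOWN"] ++ (md.map pvPair).map Prod.fst).foldl
          (pvStepB (pvInnerB (md.map pvPair))) PySem.Dict.empty).items.map
        (fun p => (p.1, p.2.items)) := by
  simp only [build_regime_summary_py_alt]
  have hzip : (md.map (fun item => (PySem.Dict.ofList item).getD "regime" "UNKNOWN")).zip
      (md.map (fun item => (PySem.Dict.ofList item).getD "outcome" "small_move")) = md.map pvPair :=
    List.zip_map'
  have hregs : md.map (fun item => (PySem.Dict.ofList item).getD "regime" "UNKNOWN")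
      = (md.map pvPair).map Prod.fst := by
    rw [List.map_map]; rfl
  rw [hzip, hregs]
  simp only [PySem.Dict.getD_counter]
  rfl

-- ===== VERDICT (by name: the statement is the Claim_ definition above) =====
theorem build_regime_summary_py_spec : Claim_equal_build_regime_summary_py := by
  intro md _
  unfold Spec_build_regime_summary_py
  rw [pvA_eq, pvB_eq, pvDictsEq (md.map pvPair)]
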